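-- pv_equiv track=rewrite | github.com/zubtsov/competitive-programming | futureskill.com/biggest-product-63eba1916bdfedf0b225f08d/solution.py | level_1_index_for_max_product
-- ===== SOURCE A (Python) =====
-- def level_1_index_for_max_product(integer_list):
--     max_product = integer_list[0] * integer_list[1]
--     max_product_index = 0
--     for i in range(1, len(integer_list) - 1):
--         current_product = integer_list[i] * integer_list[i + 1]
--         if current_product > max_product:
--             max_product = current_product
--             max_product_index = i
--     return max_product_index
-- ===== SOURCE B (Python) =====
-- def level_1_index_for_max_product(integer_list):
--     def best(lo, hi):
--         # first index i in [lo, hi) maximizing integer_list[i] * integer_list[i + 1]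
--         if hi - lo == 1:
--             return lo
--         mid = (lo + hi) // 2
--         left = best(lo, mid)
--         right = best(mid, hi)
--         if integer_list[left] * integer_list[left + 1] >= integer_list[right] * integer_list[right + 1]:
--             return left
--         return right
--     return best(0, len(integer_list) - 1)
-- ===== Notes on version B (the rewrite author's own statement) =====
-- stated objective: alternative
-- what changed: Replaces A's left-to-right running-max loop carrying (max_product, index) state with a divide-and-conquer recursion that splits the index interval in half, recursively finds the best pair index in each half, and combines with a >= comparison (left wins ties), which reproduces A's first-maximum tie-breaking.
import Mathlib
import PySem

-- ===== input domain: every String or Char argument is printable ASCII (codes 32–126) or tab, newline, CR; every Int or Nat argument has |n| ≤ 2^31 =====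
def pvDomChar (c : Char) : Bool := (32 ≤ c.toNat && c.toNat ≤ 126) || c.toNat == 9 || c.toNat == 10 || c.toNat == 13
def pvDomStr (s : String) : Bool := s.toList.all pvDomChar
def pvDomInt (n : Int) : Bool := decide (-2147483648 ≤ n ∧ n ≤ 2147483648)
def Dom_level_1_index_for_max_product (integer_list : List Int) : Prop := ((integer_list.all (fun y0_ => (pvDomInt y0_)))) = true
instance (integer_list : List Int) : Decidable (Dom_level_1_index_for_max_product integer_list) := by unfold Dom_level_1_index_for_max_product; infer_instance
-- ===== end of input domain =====

-- B replaces A's fused left-to-right running-max loop with a divide-and-conquer recursion over index intervals (left wins ties via >=); same O(n) cost, a genuinely different decomposition.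


-- ===== PORT A =====
def level_1_index_for_max_product (integer_list : List Int) : Int :=
  let max_product := PySem.List.pyGetD integer_list 0 0 * PySem.List.pyGetD integer_list 1 0
  let st := (PySem.List.pyRange 1 ((integer_list.length : Int) - 1) 1).foldl
    (fun (s : Int × Int) i =>
      let current_product := PySem.List.pyGetD integer_list i 0 * PySem.List.pyGetD integer_list (i + 1) 0
      if current_product > s.1 then (current_product, i) else s)
    (max_product, 0)
  st.2

-- ===== PORT B =====
-- best(lo, hi) of Source B: divide and conquer on the interval [lo, hi).
-- (The 'hi - lo ≤ 1' guard only makes the recursion total: Python's best diverges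
-- for hi - lo ≤ 0, which is reachable only outside Pre_.)
def pvBest (f : Int → Int) (lo hi : Int) : Int :=
  if h : hi - lo ≤ 1 then lo
  else
    let mid := PySem.Int.floordiv (lo + hi) 2
    let left := pvBest f lo mid
    let right := pvBest f mid hi
    if f left ≥ f right then left else right
termination_by (hi - lo).toNat
decreasing_by
  · have h2 : lo + 2 ≤ hi := by omega
    have : PySem.Int.floordiv (lo + hi) 2 = (lo + hi) / 2 :=
      PySem.Int.floordiv_eq_ediv_of_pos (by omega)
    omega
  · have h2 : lo + 2 ≤ hi := by omega
    have : PySem.Int.floordiv (lo + hi) 2 = (lo + hi) / 2 :=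
      PySem.Int.floordiv_eq_ediv_of_pos (by omega)
    omega

def level_1_index_for_max_product_alt (integer_list : List Int) : Int :=
  pvBest
    (fun i => PySem.List.pyGetD integer_list i 0 * PySem.List.pyGetD integer_list (i + 1) 0)
    0 ((integer_list.length : Int) - 1)

-- ===== PRECONDITION & SPEC =====
-- Pre_ excludes only lists with fewer than 2 elements, on which A raises IndexError (B does not return there either).
def Pre_level_1_index_for_max_product (integer_list : List Int) : Prop := 2 ≤ integer_list.length
instance (integer_list : List Int) : Decidable (Pre_level_1_index_for_max_product integer_list) := by unfold Pre_level_1_index_for_max_product; infer_instance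
def pvWitness_level_1_index_for_max_product : List Int := [1, 2, 3]

def Spec_level_1_index_for_max_product (integer_list : List Int) (out : Int) : Prop := out = level_1_index_for_max_product_alt integer_list
instance (integer_list : List Int) (out : Int) : Decidable (Spec_level_1_index_for_max_product integer_list out) := by unfold Spec_level_1_index_for_max_product; infer_instance

-- ===== CLAIM (what is proved, stated in full; the proofs are below) =====
def Claim_equal_level_1_index_for_max_product : Prop := ∀ (integer_list : List Int), Dom_level_1_index_for_max_product integer_list → Pre_level_1_index_for_max_product integer_list → Spec_level_1_index_for_max_product integer_list (level_1_index_for_max_product integer_list)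

-- ===== LEMMAS AND PROOFS =====

-- "r is the FIRST index in [lo, hi) maximizing f": both programs compute exactly this.
def IsFA (f : Int → Int) (lo hi r : Int) : Prop :=
  lo ≤ r ∧ r < hi ∧ (∀ i, lo ≤ i → i < hi → f i ≤ f r) ∧ (∀ i, lo ≤ i → i < r → f i < f r)

lemma isFA_unique (f : Int → Int) (lo hi r r' : Int)
    (h : IsFA f lo hi r) (h' : IsFA f lo hi r') : r = r' := by
  obtain ⟨hl, hh, hmax, hfst⟩ := h
  obtain ⟨hl', hh', hmax', hfst'⟩ := h'
  by_contra hne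
  rcases lt_or_gt_of_ne hne with hlt | hlt
  · exact absurd (hmax r' hl' hh') (not_le.mpr (hfst' r hl hlt))
  · exact absurd (hmax' r hl hh) (not_le.mpr (hfst r' hl' hlt))

-- B's divide and conquer computes the first argmax of f on [lo, hi).
lemma isFA_singleton (f : Int → Int) (lo hi : Int) (h1 : lo < hi) (h2 : hi ≤ lo + 1) :
    IsFA f lo hi lo :=
  ⟨le_refl _, h1, fun i ha hb => by
      have hi' : i = lo := by omega
      exact le_of_eq (congrArg f hi'),
    fun i ha hb => absurd hb (by omega)⟩

lemma pvBest_isFA (f : Int → Int) : ∀ (n : Nat) (lo hi : Int), (hi - lo).toNat = n →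
    lo < hi → IsFA f lo hi (pvBest f lo hi) := by
  intro n
  induction n using Nat.strong_induction_on with
  | _ n ih =>
    intro lo hi hn hlt
    rw [pvBest]
    by_cases h : hi - lo ≤ 1
    · rw [dif_pos h]
      exact isFA_singleton f lo hi hlt (by omega)
    · rw [dif_neg h]
      have hmide : PySem.Int.floordiv (lo + hi) 2 = (lo + hi) / 2 :=
        PySem.Int.floordiv_eq_ediv_of_pos (by omega)
      set mid := PySem.Int.floordiv (lo + hi) 2 with hm
      have h2 : lo + 2 ≤ hi := by omega
      have hlo_mid : lo < mid := by omega
      have hmid_hi : mid < hi := by omega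
      obtain ⟨hll, hlh, hlmax, hlfst⟩ :=
        ih (mid - lo).toNat (by omega) lo mid rfl hlo_mid
      obtain ⟨hrl, hrh, hrmax, hrfst⟩ :=
        ih (hi - mid).toNat (by omega) mid hi rfl hmid_hi
      dsimp only
      by_cases hc : f (pvBest f lo mid) ≥ f (pvBest f mid hi)
      · rw [if_pos hc]
        refine ⟨hll, by omega, ?_, ?_⟩
        · intro i ha hb
          by_cases him : i < mid
          · exact hlmax i ha him
          · exact le_trans (hrmax i (by omega) hb) hc
        · intro i ha hb
          exact hlfst i ha hb
      · rw [if_neg hc]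
        push_neg at hc
        refine ⟨by omega, hrh, ?_, ?_⟩
        · intro i ha hb
          by_cases him : i < mid
          · exact le_trans (hlmax i ha him) (le_of_lt hc)
          · exact hrmax i (by omega) hb
        · intro i ha hb
          by_cases him : i < mid
          · exact lt_of_le_of_lt (hlmax i ha him) hc
          · exact hrfst i (by omega) hb

-- A's running-max fold: folding indices k..m-1 onto a state that is the first argmax of [0,k)
-- (paired with its value) yields the first argmax of [0,m).
lemma foldA_isFA (f : Int → Int) (m : Int) : ∀ (n : Nat) (k : Int), m - k = (n : Int) → k ≤ m →
    ∀ (b : Int), IsFA f 0 k b →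
    IsFA f 0 m (((PySem.List.pyRange k m 1).foldl
      (fun (s : Int × Int) i => if f i > s.1 then (f i, i) else s) (f b, b)).2) := by
  intro n
  induction n with
  | zero =>
    intro k hk _ b hb
    have : k = m := by omega
    subst this
    have : PySem.List.pyRange k k 1 = [] := by
      simp [PySem.List.pyRange_one]
    rw [this]; simpa using hb
  | succ n ih =>
    intro k hk hkm b hb
    have hklt : k < m := by omega
    rw [PySem.List.pyRange_one_cons hklt, List.foldl_cons]
    obtain ⟨hb0, hbk, hbmax, hbfst⟩ := hb
    by_cases hc : f k > f b
    · rw [if_pos hc]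
      exact ih (k + 1) (by omega) (by omega) k
        ⟨by omega, by omega, fun i h1 h2 => by
            by_cases hik : i = k
            · subst hik; exact le_refl _
            · exact le_of_lt (lt_of_le_of_lt (hbmax i h1 (by omega)) hc),
          fun i h1 h2 => lt_of_le_of_lt (hbmax i h1 h2) hc⟩
    · rw [if_neg hc]
      push_neg at hc
      exact ih (k + 1) (by omega) (by omega) b
        ⟨hb0, by omega, fun i h1 h2 => by
            by_cases hik : i = k
            · subst hik; exact hc
            · exact hbmax i h1 (by omega),
          hbfst⟩

-- ===== VERDICT (by name: the statement is the Claim_ definition above) =====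
theorem level_1_index_for_max_product_spec : Claim_equal_level_1_index_for_max_product := by
  intro xs _ hpre
  unfold Pre_level_1_index_for_max_product at hpre
  unfold Spec_level_1_index_for_max_product
  unfold level_1_index_for_max_product level_1_index_for_max_product_alt
  dsimp only
  refine isFA_unique (fun i => PySem.List.pyGetD xs i 0 * PySem.List.pyGetD xs (i + 1) 0)
    0 ((xs.length : Int) - 1) _ _ ?_ ?_
  · exact foldA_isFA _ _ (((xs.length : Int) - 1) - 1).toNat 1 (by omega) (by omega) 0
      (isFA_singleton _ 0 1 (by omega) (by omega))
  · exact pvBest_isFA _ (((xs.length : Int) - 1)).toNat _ _ (by omega) (by omega)
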